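-- pv_equiv track=rewrite | github.com/xiexingwu/DDR-BPM-prep | src/parse_simfiles.py | locSong
-- ===== SOURCE A (Python) =====
-- def locSong(songs, title):
--     """
--     Search for a song by name and get its index.
--     If the name is not an exact match, returns indices of all songs containing the substring
--     """
--     out = []
--     src = title.lower()
--     for i, d in enumerate(songs):
--         tgt1 = d["title"].lower()
--         tgt2 = d["titletranslit"].lower()
--         if src == tgt1 or src == tgt2:
--             return [i]
--         if src in tgt1 or src in tgt2:
--             out.append(i)
--     return out
-- ===== SOURCE B (Python) =====
-- def locSong(songs, title):
--     """
--     Search for a song by name and get its index.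
--     If the name is not an exact match, returns indices of all songs containing the substring
--     """
--     src = title.lower()
--     # pass 1: find the first exact match (reads both keys per entry, lazily as A does,
--     # so it raises KeyError at exactly the same entry A would)
--     for i, d in enumerate(songs):
--         t1 = d["title"].lower()
--         t2 = d["titletranslit"].lower()
--         if src == t1 or src == t2:
--             return [i]
--     # no exact match anywhere: every entry has both keys, collect all substring matches
--     return [i for i, d in enumerate(songs)
--             if src in d["title"].lower() or src in d["titletranslit"].lower()]
-- ===== Notes on version B (the rewrite author's own statement) =====
-- stated objective: alternative
-- what changed: A's single early-return loop that interleaves exact-match testing with substring accumulation is replaced by two independent passes: a first scan that only looks for the first exact match, and a separate comprehension collecting all substring matches, run only when no exact match exists.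
import Mathlib
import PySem

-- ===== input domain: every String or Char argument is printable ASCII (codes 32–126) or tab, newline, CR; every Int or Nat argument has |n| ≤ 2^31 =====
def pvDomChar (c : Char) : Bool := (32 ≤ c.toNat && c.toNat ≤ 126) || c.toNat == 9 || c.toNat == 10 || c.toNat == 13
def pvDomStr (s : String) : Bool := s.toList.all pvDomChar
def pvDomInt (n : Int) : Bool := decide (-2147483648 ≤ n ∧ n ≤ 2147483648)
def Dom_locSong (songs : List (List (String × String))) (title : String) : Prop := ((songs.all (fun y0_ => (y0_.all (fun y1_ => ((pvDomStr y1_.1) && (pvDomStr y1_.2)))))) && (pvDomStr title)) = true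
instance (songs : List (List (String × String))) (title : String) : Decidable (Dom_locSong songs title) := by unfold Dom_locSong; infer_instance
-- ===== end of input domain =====

-- B splits A's single early-return loop (exact test interleaved with substring accumulation)
-- into two independent passes: an exact-match scan, then, only if it finds nothing, a
-- substring-collecting pass (alternative decomposition, same cost); return values agree on Pre_.

-- ===== PORT A =====
-- d["title"] / d["titletranslit"]: KeyError excluded by Pre_; getD "" is used for totality only.
def pvGoA (src : String) : List (List (String × String)) → Int → List Int → List Int
  | [], _, out => out
  | d :: rest, i, out =>
    let tgt1 := PySem.Str.lower (PySem.Dict.getD (PySem.Dict.mk d) "title" "")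
    let tgt2 := PySem.Str.lower (PySem.Dict.getD (PySem.Dict.mk d) "titletranslit" "")
    if src == tgt1 || src == tgt2 then [i]
    else if PySem.Str.isIn src tgt1 || PySem.Str.isIn src tgt2 then
      pvGoA src rest (i + 1) (out ++ [i])
    else
      pvGoA src rest (i + 1) out

def locSong (songs : List (List (String × String))) (title : String) : List Int :=
  pvGoA (PySem.Str.lower title) songs 0 []

-- ===== PORT B =====
-- first pass of Source B: index of the first exact match (both key lookups per entry, like Source B)
def pvExactScan (src : String) : List (List (String × String)) → Int → Option Int
  | [], _ => none
  | d :: rest, i =>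
    let t1 := PySem.Str.lower (PySem.Dict.getD (PySem.Dict.mk d) "title" "")
    let t2 := PySem.Str.lower (PySem.Dict.getD (PySem.Dict.mk d) "titletranslit" "")
    if src == t1 || src == t2 then some i else pvExactScan src rest (i + 1)

-- second pass of Source B: the substring-match comprehension
def pvSubMatches (src : String) : List (List (String × String)) → Int → List Int
  | [], _ => []
  | d :: rest, i =>
    if PySem.Str.isIn src (PySem.Str.lower (PySem.Dict.getD (PySem.Dict.mk d) "title" "")) ||
       PySem.Str.isIn src (PySem.Str.lower (PySem.Dict.getD (PySem.Dict.mk d) "titletranslit" "")) then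
      i :: pvSubMatches src rest (i + 1)
    else
      pvSubMatches src rest (i + 1)

def locSong_alt (songs : List (List (String × String))) (title : String) : List Int :=
  let src := PySem.Str.lower title
  match pvExactScan src songs 0 with
  | some i => [i]
  | none => pvSubMatches src songs 0

-- ===== PRECONDITION & SPEC =====
-- helper: an entry carries both keys
def pvEntryOk (d : List (String × String)) : Bool :=
  PySem.Dict.contains (PySem.Dict.mk d) "title" && PySem.Dict.contains (PySem.Dict.mk d) "titletranslit"
-- helper: the entry is an exact match for the lowered query
def pvEntryExact (src : String) (d : List (String × String)) : Bool :=
  src == PySem.Str.lower (PySem.Dict.getD (PySem.Dict.mk d) "title" "") ||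
  src == PySem.Str.lower (PySem.Dict.getD (PySem.Dict.mk d) "titletranslit" "")

-- Pre_ admits exactly the inputs where Python A (and B identically) returns: either every entry
-- has both keys, or some entry in the well-keyed prefix is an exact match (A returns [first such]
-- before reaching the malformed entry); outside Pre_ both A and B raise the same KeyError.
def Pre_locSong (songs : List (List (String × String))) (title : String) : Prop :=
  (songs.all pvEntryOk ||
   (songs.takeWhile pvEntryOk).any (pvEntryExact (PySem.Str.lower title))) = true
instance (songs : List (List (String × String))) (title : String) : Decidable (Pre_locSong songs title) := by unfold Pre_locSong; infer_instance

def pvWitness_locSong : (List (List (String × String))) × String :=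
  ([[("title", "Abc"), ("titletranslit", "x")], [("title", "zAB"), ("titletranslit", "q")]], "AB")

def Spec_locSong (songs : List (List (String × String))) (title : String) (out : List Int) : Prop := out = locSong_alt songs title
instance (songs : List (List (String × String))) (title : String) (out : List Int) : Decidable (Spec_locSong songs title out) := by unfold Spec_locSong; infer_instance

-- ===== CLAIM (what is proved, stated in full; the proofs are below) =====
def Claim_equal_locSong : Prop := ∀ (songs : List (List (String × String))) (title : String), Dom_locSong songs title → Pre_locSong songs title → Spec_locSong songs title (locSong songs title)

-- ===== LEMMAS AND PROOFS =====

-- A's interleaved loop equals: exact-match scan first, else accumulated list ++ substring scan.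
theorem pvGoA_eq (src : String) (songs : List (List (String × String))) (i : Int) (out : List Int) :
    pvGoA src songs i out =
      (match pvExactScan src songs i with
       | some j => [j]
       | none => out ++ pvSubMatches src songs i) := by
  induction songs generalizing i out with
  | nil => simp [pvGoA, pvExactScan, pvSubMatches]
  | cons d rest ih =>
    simp only [pvGoA, pvExactScan, pvSubMatches]
    by_cases h1 : (src == PySem.Str.lower (PySem.Dict.getD (PySem.Dict.mk d) "title" "") ||
        src == PySem.Str.lower (PySem.Dict.getD (PySem.Dict.mk d) "titletranslit" "")) = true
    · simp [h1]
    · simp only [h1, Bool.false_eq_true, ite_false]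
      by_cases h2 : (PySem.Str.isIn src (PySem.Str.lower (PySem.Dict.getD (PySem.Dict.mk d) "title" "")) ||
          PySem.Str.isIn src (PySem.Str.lower (PySem.Dict.getD (PySem.Dict.mk d) "titletranslit" ""))) = true
      · simp only [h2, if_true]
        rw [ih]
        cases pvExactScan src rest (i + 1) <;> simp
      · simp only [h2, Bool.false_eq_true, ite_false]
        rw [ih]

-- ===== VERDICT (by name: the statement is the Claim_ definition above) =====
theorem locSong_spec : Claim_equal_locSong := by
  intro songs title _ _
  unfold Spec_locSong locSong locSong_alt
  rw [pvGoA_eq]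
  simp
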